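-- pv_equiv track=rewrite | github.com/wsurpermen/SS-NIC | contrast/mCRF.py | checkLabelSequence
-- ===== SOURCE A (Python) =====
-- def checkLabelSequence(labels):
--     index1 = 0
--     leaf_label = labels[0]
--     for i in range(1, len(labels)):
--         if leaf_label != labels[i]:
--             index1 = i
--             break
--     if index1 == 0:
--         return 0
--
--     index2 = 0
--     for i in range(index1 + 1, len(labels)):
--         if leaf_label == labels[i]:
--             index2 = i - 1
--             break
--     if index2 == 0:
--         index2 = len(labels)
--     return index2 - index1
-- ===== SOURCE B (Python) =====
-- def checkLabelSequence(labels):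
--     leaf = labels[0]
--     # run-length encode labels into (value, length) runs
--     runs = []
--     cur = leaf
--     cnt = 0
--     for x in labels:
--         if x == cur:
--             cnt += 1
--         else:
--             runs.append((cur, cnt))
--             cur = x
--             cnt = 1
--     runs.append((cur, cnt))
--     if len(runs) == 1:
--         return 0
--     index1 = runs[0][1]
--     start = index1
--     for v, l in runs[1:]:
--         if v == leaf:
--             return start - 1 - index1
--         start += l
--     return len(labels) - index1
-- ===== Notes on version B (the rewrite author's own statement) =====
-- stated objective: alternative
-- what changed: B run-length encodes the labels into (value,length) runs in one pass and answers from the run list, instead of A's two index-scanning loops with break/sentinel logic.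
-- outside the precondition, e.g. on checkLabelSequence([]): A raises IndexError, B raises IndexError
import Mathlib
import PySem

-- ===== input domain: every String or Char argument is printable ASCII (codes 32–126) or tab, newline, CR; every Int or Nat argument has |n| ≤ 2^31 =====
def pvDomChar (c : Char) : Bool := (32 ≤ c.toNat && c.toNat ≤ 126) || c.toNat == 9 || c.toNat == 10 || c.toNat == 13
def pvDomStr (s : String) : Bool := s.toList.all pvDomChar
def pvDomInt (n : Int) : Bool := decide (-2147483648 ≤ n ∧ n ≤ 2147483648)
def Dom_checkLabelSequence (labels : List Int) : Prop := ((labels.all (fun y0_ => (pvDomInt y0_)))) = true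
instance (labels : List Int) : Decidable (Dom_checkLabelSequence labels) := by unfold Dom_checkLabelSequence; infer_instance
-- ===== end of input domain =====

-- B replaces A's two index-scanning break loops by a one-pass run-length encoding and a scan over the runs (alternative decomposition, same O(n) cost).

-- ===== PORT A =====
-- first loop of A: for i in range(1, len) ... break at first labels[i] ≠ leaf (index1 stays 0 otherwise)
def aLoop1 (leaf : Int) (labels : List Int) (i : Nat) : Int :=
  if h : i < labels.length then
    if leaf ≠ labels[i] then (i : Int) else aLoop1 leaf labels (i + 1)
  else 0
termination_by labels.length - i

-- second loop of A: for i in range(index1+1, len) ... break at first labels[i] = leaf (index2 stays 0 otherwise)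
def aLoop2 (leaf : Int) (labels : List Int) (i : Nat) : Int :=
  if h : i < labels.length then
    if leaf = labels[i] then (i : Int) - 1 else aLoop2 leaf labels (i + 1)
  else 0
termination_by labels.length - i

def checkLabelSequence (labels : List Int) : Int :=
  match labels with
  | [] => 0   -- unreachable: Python A raises IndexError on [], excluded by Pre_
  | leaf :: _ =>
    let index1 := aLoop1 leaf labels 1
    if index1 = 0 then 0
    else
      let index2 := aLoop2 leaf labels (index1.toNat + 1)
      let index2' := if index2 = 0 then (labels.length : Int) else index2
      index2' - index1

-- ===== PORT B =====
-- run-length encoding loop of B: cur/cnt is the open run, flushed when the value changes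
def rleGo (cur cnt : Int) : List Int → List (Int × Int)
  | [] => [(cur, cnt)]
  | x :: xs => if x = cur then rleGo cur (cnt + 1) xs else (cur, cnt) :: rleGo x 1 xs

-- B's loop over runs[1:], with running start offset
def bLoop (leaf index1 total : Int) (start : Int) : List (Int × Int) → Int
  | [] => total - index1
  | (v, l) :: rs => if v = leaf then start - 1 - index1 else bLoop leaf index1 total (start + l) rs

def checkLabelSequence_alt (labels : List Int) : Int :=
  match labels with
  | [] => 0   -- unreachable: labels[0] raises IndexError on [], excluded by Pre_
  | leaf :: _ =>
    let runs := rleGo leaf 0 labels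
    if runs.length = 1 then 0
    else
      let index1 := runs.headI.2
      bLoop leaf index1 (labels.length : Int) index1 runs.tail

-- ===== PRECONDITION & SPEC =====
-- Pre_ excludes only the empty list, on which Python A raises IndexError (labels[0]).
def Pre_checkLabelSequence (labels : List Int) : Prop := labels ≠ []
instance (labels : List Int) : Decidable (Pre_checkLabelSequence labels) := by unfold Pre_checkLabelSequence; infer_instance
def pvWitness_checkLabelSequence : List Int := [1, 1, 2, 2, 1]

def Spec_checkLabelSequence (labels : List Int) (out : Int) : Prop := out = checkLabelSequence_alt labels
instance (labels : List Int) (out : Int) : Decidable (Spec_checkLabelSequence labels out) := by unfold Spec_checkLabelSequence; infer_instance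

-- ===== CLAIM (what is proved, stated in full; the proofs are below) =====
def Claim_equal_checkLabelSequence : Prop := ∀ (labels : List Int), Dom_checkLabelSequence labels → Pre_checkLabelSequence labels → Spec_checkLabelSequence labels (checkLabelSequence labels)

-- ===== LEMMAS AND PROOFS =====

-- spec helper: first index in l whose element differs from leaf
def fd (leaf : Int) : List Int → Option Nat
  | [] => none
  | y :: ys => if y = leaf then (fd leaf ys).map (· + 1) else some 0

-- spec helper: first index in l whose element equals leaf
def fe (leaf : Int) : List Int → Option Nat
  | [] => none
  | y :: ys => if y = leaf then some 0 else (fe leaf ys).map (· + 1)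

theorem aLoop1_char (leaf : Int) (labels : List Int) (i : Nat) :
    aLoop1 leaf labels i = (fd leaf (labels.drop i)).elim 0 (fun j => ((i + j : Nat) : Int)) := by
  fun_induction aLoop1 leaf labels i with
  | case1 i h hne =>
    rw [List.drop_eq_getElem_cons h]
    simp [fd, Ne.symm hne]
  | case2 i h heq ih =>
    have heq' : labels[i] = leaf := (not_not.mp heq).symm
    rw [List.drop_eq_getElem_cons h]
    simp only [fd, heq']
    rw [ih]
    cases hfd : fd leaf (labels.drop (i+1)) with
    | none => simp
    | some j => simp; omega
  | case3 i h =>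
    rw [List.drop_eq_nil_of_le (by omega)]
    simp [fd]

theorem aLoop2_char (leaf : Int) (labels : List Int) (i : Nat) :
    aLoop2 leaf labels i = (fe leaf (labels.drop i)).elim 0 (fun j => ((i + j : Nat) : Int) - 1) := by
  fun_induction aLoop2 leaf labels i with
  | case1 i h heq =>
    rw [List.drop_eq_getElem_cons h]
    simp [fe, heq.symm]
  | case2 i h hne ih =>
    rw [List.drop_eq_getElem_cons h]
    simp only [fe, if_neg (fun hc : labels[i] = leaf => hne hc.symm)]
    rw [ih]
    cases hfe : fe leaf (labels.drop (i+1)) with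
    | none => simp
    | some j => simp; omega
  | case3 i h =>
    rw [List.drop_eq_nil_of_le (by omega)]
    simp [fe]

-- run-length encoding characterisation
def rleRest : List Int → List (Int × Int)
  | [] => []
  | y :: ys => rleGo y 1 ys

theorem rleGo_char (cur cnt : Int) (l : List Int) :
    rleGo cur cnt l = (cur, cnt + ((l.takeWhile (fun y => y == cur)).length : Int)) ::
      rleRest (l.dropWhile (fun y => y == cur)) := by
  induction l generalizing cnt with
  | nil => simp [rleGo, rleRest]
  | cons x xs ih =>
    by_cases hx : x = cur
    · subst hx
      simp only [rleGo, if_true, List.takeWhile_cons, BEq.rfl, List.dropWhile_cons]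
      rw [ih]
      simp; ring_nf
    · have hb : (x == cur) = false := by simp [hx]
      simp [rleGo, hx, hb, rleRest]

theorem bLoop_char (leaf i1 total start cur cnt : Int) (l : List Int) (h : cur ≠ leaf) :
    bLoop leaf i1 total start (rleGo cur cnt l) =
      (fe leaf l).elim (total - i1) (fun j => start + cnt + (j : Int) - 1 - i1) := by
  induction l generalizing cur cnt start with
  | nil => simp [rleGo, bLoop, fe, h]
  | cons y ys ih =>
    by_cases hy : y = cur
    · subst hy
      simp only [rleGo, if_true]
      rw [ih _ _ _ h]
      simp only [fe, if_neg h]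
      cases hfe : fe leaf ys with
      | none => simp
      | some j => simp; ring_nf
    · simp only [rleGo, if_neg hy, bLoop, if_neg h]
      by_cases hl : y = leaf
      · subst hl
        rw [rleGo_char]
        simp [bLoop, fe]
      · rw [ih _ _ _ hl]
        simp only [fe, if_neg hl]
        cases hfe : fe leaf ys with
        | none => simp
        | some j => simp; ring_nf

theorem fd_none (leaf : Int) (l : List Int) (h : ∀ y ∈ l, y = leaf) : fd leaf l = none := by
  induction l with
  | nil => rfl
  | cons y ys ih =>
    simp only [fd, if_pos (h y (by simp))]
    rw [ih (fun z hz => h z (by simp [hz]))]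
    rfl

theorem fd_concat (leaf m : Int) (t ms : List Int) (ht : ∀ y ∈ t, y = leaf) (hm : m ≠ leaf) :
    fd leaf (t ++ m :: ms) = some t.length := by
  induction t with
  | nil => simp [fd, hm]
  | cons y ys ih =>
    simp only [List.cons_append, fd, if_pos (ht y (by simp))]
    rw [ih (fun z hz => ht z (by simp [hz]))]
    simp

theorem dropWhile_head_ne (x m : Int) (ms xs : List Int) (h : xs.dropWhile (fun y => y == x) = m :: ms) : m ≠ x := by
  induction xs with
  | nil => simp at h
  | cons y ys ih =>
    by_cases hy : y = x
    · rw [List.dropWhile_cons_of_pos (by simp [hy])] at h; exact ih h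
    · rw [List.dropWhile_cons_of_neg (by simp [hy])] at h
      cases h; exact hy

theorem main_eq (x : Int) (xs : List Int) :
    checkLabelSequence (x :: xs) = checkLabelSequence_alt (x :: xs) := by
  have hxs : xs.takeWhile (fun y => y == x) ++ xs.dropWhile (fun y => y == x) = xs :=
    List.takeWhile_append_dropWhile
  have ht : ∀ y ∈ xs.takeWhile (fun y => y == x), y = x := by
    intro y hy
    have := List.mem_takeWhile_imp hy
    simpa using this
  have hrle : rleGo x 0 (x :: xs) =
      (x, 0 + (((x :: xs).takeWhile (fun y => y == x)).length : Int)) ::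
        rleRest ((x :: xs).dropWhile (fun y => y == x)) := rleGo_char x 0 (x :: xs)
  rw [List.takeWhile_cons_of_pos (by simp), List.dropWhile_cons_of_pos (by simp)] at hrle
  cases hd : xs.dropWhile (fun y => y == x) with
  | nil =>
    -- all of xs equals x: both sides return 0
    have hall : ∀ y ∈ xs, y = x := by
      intro y hy
      rw [← hxs, hd, List.append_nil] at hy
      exact ht y hy
    have hfd : fd x xs = none := fd_none x xs hall
    rw [hd] at hrle
    simp [checkLabelSequence, checkLabelSequence_alt, aLoop1_char, hfd, hrle, rleRest]
  | cons m ms =>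
    have hm : m ≠ x := dropWhile_head_ne x m ms xs hd
    rw [hd] at hrle hxs
    generalize hT : xs.takeWhile (fun y => y == x) = t at hxs ht hrle
    have hsplit : xs = t ++ m :: ms := hxs.symm
    have hfd : fd x xs = some t.length := by
      rw [hsplit]; exact fd_concat x m t ms ht hm
    have hdrop : (x :: xs).drop (t.length + 2) = ms := by
      have h1 : x :: xs = (x :: t ++ [m]) ++ ms := by rw [hsplit]; simp
      rw [h1]
      have h2 : (x :: t ++ [m]).length = t.length + 2 := by simp
      rw [← h2, List.drop_left]
    -- A side
    simp only [checkLabelSequence, checkLabelSequence_alt, aLoop1_char, List.drop_one,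
      List.tail_cons, hfd, Option.elim]
    have hne1 : ((1 + t.length : Nat) : Int) ≠ 0 := by push_cast; omega
    rw [if_neg hne1]
    have htn : ((1 + t.length : Nat) : Int).toNat + 1 = t.length + 2 := by omega
    rw [aLoop2_char, htn, hdrop]
    -- B side
    rw [hrle]
    have hlen : ((x, 0 + ((x :: t).length : Int)) :: rleRest (m :: ms)).length ≠ 1 := by
      simp only [rleRest, rleGo_char m 1 ms, List.length_cons]
      omega
    rw [if_neg hlen]
    simp only [List.headI, List.tail_cons, rleRest]
    rw [bLoop_char _ _ _ _ _ _ _ hm]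
    have hlength : (x :: xs).length = t.length + 2 + ms.length := by
      rw [hsplit]; simp only [List.length_cons, List.length_append]; omega
    cases hfe : fe x ms with
    | none =>
      simp only [Option.elim, if_true, List.length_cons, hlength]
      push_cast
      omega
    | some j =>
      simp only [Option.elim]
      have hne2 : ((t.length + 2 + j : Nat) : Int) - 1 ≠ 0 := by push_cast; omega
      rw [if_neg hne2]
      push_cast
      ring

-- ===== VERDICT (by name: the statement is the Claim_ definition above) =====
theorem checkLabelSequence_spec : Claim_equal_checkLabelSequence := by
  intro labels _ hpre
  unfold Spec_checkLabelSequence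
  cases labels with
  | nil => exact absurd rfl hpre
  | cons x xs => exact main_eq x xs
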